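-- pv_equiv track=rewrite | github.com/Jingle-seven/Jingle-wx | jingle-py/util/JingleUtil.py | intToIp
-- ===== SOURCE A (Python) =====
-- def intToIp(ipNum):
--     for i in range(4):
--         if i==0:
--             s = str(ipNum % 256)
--         else:
--             s = str(ipNum % 256) + "."+s
--         ipNum = ipNum // 256
--
--     return s
-- ===== SOURCE B (Python) =====
-- def intToIp(ipNum):
--     return "%s.%s.%s.%s" % (
--         (ipNum // 16777216) % 256,
--         (ipNum // 65536) % 256,
--         (ipNum // 256) % 256,
--         ipNum % 256,
--     )
-- ===== Notes on version B (the rewrite author's own statement) =====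
-- stated objective: simpler
-- what changed: Replaces the loop that carries ipNum and prepends onto a string (with an i==0 special case) by a closed-form extraction of the four bytes with fixed divisors and a single format string.
import Mathlib
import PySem

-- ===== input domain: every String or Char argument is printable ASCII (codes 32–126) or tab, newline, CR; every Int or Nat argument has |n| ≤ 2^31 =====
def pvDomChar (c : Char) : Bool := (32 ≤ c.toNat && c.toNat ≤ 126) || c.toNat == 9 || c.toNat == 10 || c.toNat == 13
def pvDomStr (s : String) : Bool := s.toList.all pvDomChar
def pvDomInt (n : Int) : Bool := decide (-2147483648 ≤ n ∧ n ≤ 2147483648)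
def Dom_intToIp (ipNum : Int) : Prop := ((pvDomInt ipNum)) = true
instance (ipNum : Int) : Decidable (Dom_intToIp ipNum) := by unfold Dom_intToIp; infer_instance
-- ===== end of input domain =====

-- B replaces A's carrying loop (with its i==0 special case and string prepending) by a
-- closed-form per-byte extraction with fixed divisors; objective: simpler.

-- ===== PORT A =====
-- loop: for i in range(4): build s (prepending except at i==0), ipNum //= 256
def intToIp (ipNum : Int) : String :=
  (((PySem.List.pyRange 0 4 1).foldl
    (fun (st : String × Int) (i : Int) =>
      let s := if i == 0 then PySem.Int.toStr (PySem.Int.mod st.2 256)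
               else PySem.Int.toStr (PySem.Int.mod st.2 256) ++ "." ++ st.1
      (s, PySem.Int.floordiv st.2 256))
    ("", ipNum))).1

-- ===== PORT B =====
def intToIp_alt (ipNum : Int) : String :=
  PySem.Int.toStr (PySem.Int.mod (PySem.Int.floordiv ipNum 16777216) 256) ++ "." ++
  PySem.Int.toStr (PySem.Int.mod (PySem.Int.floordiv ipNum 65536) 256) ++ "." ++
  PySem.Int.toStr (PySem.Int.mod (PySem.Int.floordiv ipNum 256) 256) ++ "." ++
  PySem.Int.toStr (PySem.Int.mod ipNum 256)

-- ===== PRECONDITION & SPEC =====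
def Spec_intToIp (ipNum : Int) (out : String) : Prop := out = intToIp_alt ipNum
instance (ipNum : Int) (out : String) : Decidable (Spec_intToIp ipNum out) := by unfold Spec_intToIp; infer_instance

-- ===== CLAIM (what is proved, stated in full; the proofs are below) =====
def Claim_equal_intToIp : Prop := ∀ (ipNum : Int), Dom_intToIp ipNum → Spec_intToIp ipNum (intToIp ipNum)

-- ===== LEMMAS AND PROOFS =====

theorem pyRange04 : PySem.List.pyRange 0 4 1 = [0, 1, 2, 3] := by decide

-- ===== VERDICT (by name: the statement is the Claim_ definition above) =====
theorem intToIp_spec : Claim_equal_intToIp := by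
  intro ipNum _
  unfold Spec_intToIp intToIp intToIp_alt
  rw [pyRange04]
  simp only [List.foldl]
  norm_num
  have h2 : ipNum / 256 / 256 = ipNum / 65536 := by omega
  have h3 : ipNum / 65536 / 256 = ipNum / 16777216 := by omega
  rw [h2, h3]
  simp [String.append_assoc]
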